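-- pv_equiv track=rewrite | github.com/rpania30/CS112-Intro-to-Programming | PA 5/rpania_001_PA5.py | equal_sum
-- ===== SOURCE A (Python) =====
-- def equal_sum(numbers):
--     count = 2
--     index = 1
--     first_val = numbers[0]
--     #The loop runs as long as there are enough numbers to cover the whole list
--     while index <= len(numbers)-count:
--         compare_val = 0
--         difference = 0
--         #Loops through count number of times and creates a value to compare \
--         #to the first value
--         for num in range(count):
--             compare_val += numbers[index + difference]
--             difference += 1
--         #If the values are equal, then the outer loop is continued
--         if compare_val == first_val:
--             count += 1
--         #If the values are inequal, then False is returned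
--         else:
--             return False
--         index += (count - 1)
--     #If the outer loop finishes running, True is returned
--     return True
-- ===== SOURCE B (Python) =====
-- def equal_sum(numbers):
--     first_val = numbers[0]
--     n = len(numbers)
--     prefix = [0]
--     for x in numbers:
--         prefix.append(prefix[-1] + x)
--     # boundary b is the m-th triangular number: after m complete segments the
--     # prefix sum must be exactly m * first_val
--     m = 2
--     b = 3
--     while b <= n:
--         if prefix[b] != m * first_val:
--             return False
--         m += 1
--         b += m
--     return True
-- ===== Notes on version B (the rewrite author's own statement) =====
-- stated objective: alternative
-- what changed: Builds a prefix-sum table in one pass, then checks only the triangular-number boundary positions: after m complete segments the prefix sum there must equal m*first_val; no per-segment summing and no segment accumulator.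
import Mathlib
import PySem

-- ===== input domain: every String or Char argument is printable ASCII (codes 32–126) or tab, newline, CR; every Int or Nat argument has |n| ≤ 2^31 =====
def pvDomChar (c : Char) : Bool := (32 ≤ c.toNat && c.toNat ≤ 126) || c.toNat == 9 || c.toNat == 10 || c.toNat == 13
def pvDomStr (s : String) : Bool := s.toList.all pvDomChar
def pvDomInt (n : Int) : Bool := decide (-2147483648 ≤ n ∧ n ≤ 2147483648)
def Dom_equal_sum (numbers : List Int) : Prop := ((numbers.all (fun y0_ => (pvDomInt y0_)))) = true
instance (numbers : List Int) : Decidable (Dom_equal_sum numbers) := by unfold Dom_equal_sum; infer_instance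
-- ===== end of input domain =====

-- B replaces A's nested segment/re-summation loops by a prefix-sum table checked at the
-- triangular-number boundary positions of the prefix table (objective: alternative);
-- equal value on every nonempty list.

-- ===== PORT A =====
-- A's outer while loop; `count` is represented as `k + 2` (it starts at 2 and only
-- increments). The `fuel` argument only makes the recursion structural: the loop body
-- increases `index` by at least 2, so with fuel = length + 1 the 0-fuel branch (whose
-- value `true` coincides with the loop's normal exit) is never reached.
def equalSumLoop (numbers : List Int) (first_val : Int) : Nat → Nat → Nat → Bool
  | 0, _, _ => true
  | fuel + 1, k, index =>
    if index + (k + 2) ≤ numbers.length then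
      -- inner for-loop: compare_val += numbers[index + difference], difference 0..count-1
      let compare_val := (List.range (k + 2)).foldl
        (fun acc d => acc + PySem.List.pyGetD numbers ((index + d : Nat) : Int) 0) 0
      if compare_val = first_val then
        equalSumLoop numbers first_val fuel (k + 1) (index + (k + 2))
      else false
    else true

def equal_sum (numbers : List Int) : Bool :=
  equalSumLoop numbers (PySem.List.pyGetD numbers 0 0) (numbers.length + 1) 0 1

-- ===== PORT B =====
-- 'for x in numbers: prefix.append(prefix[-1] + x)'
def buildPrefix : List Int → List Int → List Int
  | ps, [] => ps
  | ps, x :: rest => buildPrefix (ps ++ [PySem.List.pyGetD ps (-1) 0 + x]) rest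

-- 'while b <= n: if prefix[b] != m*first_val: return False; m += 1; b += m'
-- (fuel makes the recursion structural; b grows by at least 3 per iteration, so with
-- fuel = n + 1 the 0-fuel branch, whose value `true` matches the loop exit, is unreachable)
def checkBoundaries (pre : List Int) (first : Int) (n : Nat) : Nat → Nat → Nat → Bool
  | 0, _, _ => true
  | fuel + 1, m, b =>
    if b ≤ n then
      if PySem.List.pyGetD pre ((b : Nat) : Int) 0 ≠ (m : Int) * first then
        false
      else checkBoundaries pre first n fuel (m + 1) (b + (m + 1))
    else true

def equal_sum_alt (numbers : List Int) : Bool :=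
  let first_val := PySem.List.pyGetD numbers 0 0
  let pre := buildPrefix [0] numbers
  checkBoundaries pre first_val numbers.length (numbers.length + 1) 2 3

-- ===== PRECONDITION & SPEC =====
-- Pre_ excludes only the empty list, on which both Pythons raise IndexError reading the first element.
def Pre_equal_sum (numbers : List Int) : Prop := numbers ≠ []
instance (numbers : List Int) : Decidable (Pre_equal_sum numbers) := by
  unfold Pre_equal_sum; infer_instance
def pvWitness_equal_sum : List Int := ([3, 1, 2])

def Spec_equal_sum (numbers : List Int) (out : Bool) : Prop := out = equal_sum_alt numbers
instance (numbers : List Int) (out : Bool) : Decidable (Spec_equal_sum numbers out) := by unfold Spec_equal_sum; infer_instance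

-- ===== CLAIM (what is proved, stated in full; the proofs are below) =====
def Claim_equal_equal_sum : Prop := ∀ (numbers : List Int), Dom_equal_sum numbers → Pre_equal_sum numbers → Spec_equal_sum numbers (equal_sum numbers)

-- ===== LEMMAS AND PROOFS =====

-- buildPrefix appends, left to right, the running sums continuing from the last entry.
theorem scanl_cons_head (l : List Int) (b : Int) :
    l.scanl (· + ·) b = b :: (l.scanl (· + ·) b).tail := by
  cases l <;> simp [List.scanl_nil, List.scanl_cons]

theorem buildPrefix_eq : ∀ (xs ps : List Int) (hps : ps ≠ []),
    buildPrefix ps xs = ps ++ (xs.scanl (· + ·) (ps.getLast hps)).tail := by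
  intro xs
  induction xs with
  | nil => intro ps hps; simp [buildPrefix, List.scanl_nil]
  | cons x rest ih =>
    intro ps hps
    rw [buildPrefix, PySem.List.pyGetD_neg_one ps 0 hps,
      ih (ps ++ [ps.getLast hps + x]) (by simp)]
    have hl : (ps ++ [ps.getLast hps + x]).getLast (by simp) = ps.getLast hps + x := by
      simp
    rw [hl]
    rw [List.scanl_cons]
    simp only [List.tail_cons, List.append_assoc, List.singleton_append]
    rw [scanl_cons_head rest (ps.getLast hps + x)]
    simp

-- The prefix table of B is the scanl of the input.
theorem buildPrefix_zero (xs : List Int) :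
    buildPrefix [0] xs = xs.scanl (· + ·) 0 := by
  rw [buildPrefix_eq xs [0] (by simp)]
  simp only [List.getLast_singleton]
  rw [scanl_cons_head xs 0]
  rfl

-- Entry i of the scanl is the sum of the first i elements.
theorem scanl_getElem? : ∀ (xs : List Int) (a : Int) (i : Nat), i ≤ xs.length →
    (xs.scanl (· + ·) a)[i]? = some (a + (xs.take i).sum) := by
  intro xs
  induction xs with
  | nil =>
    intro a i h
    have hi : i = 0 := by simpa using h
    subst hi
    simp [List.scanl_nil]
  | cons x rest ih =>
    intro a i h
    cases i with
    | zero => rw [scanl_cons_head]; simp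
    | succ j =>
      rw [List.scanl_cons]
      simp only [List.getElem?_cons_succ]
      rw [ih (a + x) j (by simpa using h)]
      simp [add_assoc]

-- A's inner for-loop computes the sum of the segment numbers[index : index + c].
theorem innerSum_eq : ∀ (c index : Nat) (numbers : List Int), index + c ≤ numbers.length →
    (List.range c).foldl
      (fun acc d => acc + PySem.List.pyGetD numbers ((index + d : Nat) : Int) 0) 0
      = ((numbers.drop index).take c).sum := by
  intro c
  induction c with
  | zero => intro index numbers _; rfl
  | succ n ih =>
    intro index numbers h
    rw [List.range_succ, List.foldl_append]
    rw [ih index numbers (by omega)]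
    simp only [List.foldl_cons, List.foldl_nil]
    have hlt : index + n < numbers.length := by omega
    rw [PySem.List.pyGetD_natCast]
    rw [List.take_add_one]
    rw [List.sum_append]
    have hg : (numbers.drop index)[n]? = some numbers[index + n] := by
      rw [List.getElem?_drop]
      exact List.getElem?_eq_getElem (by omega)
    rw [hg]
    simp [List.getD_eq_getElem?_getD, List.getElem?_eq_getElem hlt]

-- Main correspondence: A's segment loop at `index`, knowing the prefix sum up to `index`
-- is (k+1)*first, equals B's boundary check at m = k+2, boundary b = index + (k+2),
-- with the same fuel on both sides.
theorem loop_eq : ∀ (fuel k index : Nat) (numbers : List Int) (first : Int),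
    (numbers.take index).sum = (k + 1 : Nat) * first →
    equalSumLoop numbers first fuel k index
      = checkBoundaries (numbers.scanl (· + ·) 0) first numbers.length fuel (k + 2)
          (index + (k + 2)) := by
  intro fuel
  induction fuel with
  | zero => intro k index numbers first _; rfl
  | succ m ih =>
    intro k index numbers first hsum
    by_cases hg : index + (k + 2) ≤ numbers.length
    · rw [equalSumLoop, if_pos hg, checkBoundaries, if_pos hg]
      simp only [innerSum_eq (k + 2) index numbers hg]
      rw [PySem.List.pyGetD_natCast, List.getD_eq_getElem?_getD,
        scanl_getElem? numbers 0 (index + (k + 2)) hg]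
      have hsplit : (numbers.take (index + (k + 2))).sum
          = (numbers.take index).sum + ((numbers.drop index).take (k + 2)).sum := by
        rw [List.take_add, List.sum_append]
      rw [hsplit, hsum]
      simp only [Option.getD_some, zero_add]
      set seg := ((numbers.drop index).take (k + 2)).sum with hseg
      by_cases hc : seg = first
      · have hbc : ¬ ((k + 1 : Nat) * first + seg ≠ (k + 2 : Nat) * first) := by
          push_cast; rw [hc]; intro hq; apply hq; ring
        rw [if_pos hc, if_neg hbc]
        have := ih (k + 1) (index + (k + 2)) numbers first
          (by rw [hsplit, hsum, hc]; push_cast; ring)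
        rw [this, show index + (k + 2) + (k + 1 + 2) = index + (k + 2) + (k + 2 + 1) by omega]
      · have hbc : ((k + 1 : Nat) * first + seg ≠ (k + 2 : Nat) * first) := by
          push_cast
          intro hq
          apply hc
          linarith
        rw [if_neg hc, if_pos hbc]
    · rw [equalSumLoop, if_neg hg, checkBoundaries, if_neg hg]

-- ===== VERDICT (by name: the statement is the Claim_ definition above) =====
theorem equal_sum_spec : Claim_equal_equal_sum := by
  intro numbers _ hpre
  obtain ⟨x, rest, rfl⟩ := List.exists_cons_of_ne_nil hpre
  unfold Spec_equal_sum equal_sum equal_sum_alt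
  simp only
  rw [buildPrefix_zero]
  exact loop_eq ((x :: rest).length + 1) 0 1 (x :: rest) (PySem.List.pyGetD (x :: rest) 0 0)
    (by simp [PySem.List.pyGetD, PySem.List.pyGet?, PySem.List.pyIdx?])
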